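-- pv_equiv track=rewrite | github.com/fizaashraf37/Leetcode | 3760-maximum-substrings-with-distinct-start/3760-maximum-substrings-with-distinct-start.py | maxDistinct
-- ===== SOURCE A (Python) =====
-- def maxDistinct(s: str) -> int:
--
--     hash_set = set()
--     count = 0
--
--     for char in s:
--         if char not in hash_set:
--             hash_set.add(char)
--             count += 1
--
--     return count
-- ===== SOURCE B (Python) =====
-- def maxDistinct(s: str) -> int:
--     count = 0
--     prev = None
--     for ch in sorted(s):
--         if ch != prev:
--             count += 1
--             prev = ch
--     return count
-- ===== Notes on version B (the rewrite author's own statement) =====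
-- stated objective: alternative
-- what changed: Replaces the growing hash-set membership count with sorting the characters and counting contiguous runs (increment when a character differs from the previous one) in a single pass over the sorted list.
import Mathlib
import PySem

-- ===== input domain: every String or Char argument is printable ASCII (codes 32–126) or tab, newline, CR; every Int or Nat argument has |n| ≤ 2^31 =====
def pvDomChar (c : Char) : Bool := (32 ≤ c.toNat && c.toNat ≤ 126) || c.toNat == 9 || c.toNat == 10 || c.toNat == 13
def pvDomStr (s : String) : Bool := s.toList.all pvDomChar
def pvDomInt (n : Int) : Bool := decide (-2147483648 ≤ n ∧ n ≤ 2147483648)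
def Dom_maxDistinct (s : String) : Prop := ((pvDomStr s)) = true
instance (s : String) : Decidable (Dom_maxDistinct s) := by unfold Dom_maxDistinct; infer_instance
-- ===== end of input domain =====

-- B sorts the characters and counts runs instead of growing a hash set: a different decomposition, same O-ish cost.

-- ===== PORT A =====
-- hash_set grows, count increments on first sight of each character
def maxDistinct (s : String) : Int :=
  (s.toList.foldl
    (fun (st : PySem.Set Char × Int) ch =>
      if ¬ PySem.Set.contains st.1 ch then (PySem.Set.add st.1 ch, st.2 + 1) else st)
    (PySem.Set.empty, 0)).2

-- ===== PORT B =====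
-- count = runs in sorted(s): increment whenever ch differs from prev
def maxDistinct_alt (s : String) : Int :=
  ((PySem.List.sorted s.toList (fun c => c) false).foldl
    (fun (st : Int × Option Char) ch =>
      if some ch ≠ st.2 then (st.1 + 1, some ch) else st)
    (0, none)).1

-- ===== PRECONDITION & SPEC =====
def Spec_maxDistinct (s : String) (out : Int) : Prop := out = maxDistinct_alt s
instance (s : String) (out : Int) : Decidable (Spec_maxDistinct s out) := by unfold Spec_maxDistinct; infer_instance

-- ===== CLAIM (what is proved, stated in full; the proofs are below) =====
def Claim_equal_maxDistinct : Prop := ∀ (s : String), Dom_maxDistinct s → Spec_maxDistinct s (maxDistinct s)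

-- ===== LEMMAS AND PROOFS =====

theorem pvCardInsert (c : Char) (s : Finset Char) :
    (insert c s).card = (s.erase c).card + 1 := by
  by_cases hc : c ∈ s
  · rw [Finset.insert_eq_self.mpr hc, ← Finset.card_erase_add_one hc]
  · rw [Finset.card_insert_of_notMem hc, Finset.erase_eq_of_notMem hc]

-- A's loop: the count is the growth of the set
theorem pvA_loop (l : List Char) (st : PySem.Set Char) (k : Int) :
    (l.foldl
      (fun (st : PySem.Set Char × Int) ch =>
        if ¬ PySem.Set.contains st.1 ch then (PySem.Set.add st.1 ch, st.2 + 1) else st)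
      (st, k)).2 = k + ((l.foldl PySem.Set.add st).length : Int) - (st.length : Int) := by
  induction l generalizing st k with
  | nil => simp
  | cons c t ih =>
    simp only [List.foldl_cons]
    by_cases h : PySem.Set.contains st c
    · have hadd : PySem.Set.add st c = st := by
        have hm : c ∈ st := by simpa using h
        simp [PySem.Set.add, hm]
      rw [if_neg (not_not_intro h), hadd]
      exact ih st k
    · have hadd : PySem.Set.add st c = st ++ [c] := by
        have hm : c ∉ st := by simpa using h
        simp [PySem.Set.add, hm]
      rw [if_pos h, hadd, ih]
      simp only [List.length_append, List.length_cons, List.length_nil]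
      push_cast
      ring

theorem pvA_eq_ofList (s : String) :
    maxDistinct s = ((PySem.Set.ofList s.toList).length : Int) := by
  rw [maxDistinct, pvA_loop, PySem.Set.ofList_eq_foldl]
  simp [PySem.Set.empty]

-- run counter matching B's fold
def pvRuns : Option Char → List Char → Int
  | _, [] => 0
  | p, c :: t => (if some c = p then 0 else 1) + pvRuns (some c) t

theorem pvB_loop (l : List Char) (k : Int) (p : Option Char) :
    (l.foldl
      (fun (st : Int × Option Char) ch =>
        if some ch ≠ st.2 then (st.1 + 1, some ch) else st)
      (k, p)).1 = k + pvRuns p l := by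
  induction l generalizing k p with
  | nil => simp [pvRuns]
  | cons c t ih =>
    simp only [List.foldl_cons]
    by_cases h : some c = p
    · rw [if_neg (not_not_intro h), ih]
      subst h
      simp [pvRuns]
    · rw [if_pos h, ih]
      simp [pvRuns, h]
      ring

-- on a sorted list, runs count distinct elements
theorem pvRuns_sorted_some (l : List Char) : l.Pairwise (· ≤ ·) → ∀ (p : Char),
    (∀ x ∈ l, p ≤ x) → pvRuns (some p) l = ((l.toFinset.erase p).card : Int) := by
  induction l with
  | nil => intro _ p _; simp [pvRuns]
  | cons c t ih =>
    intro hl p hp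
    have hct : ∀ x ∈ t, c ≤ x := fun x hx => (List.pairwise_cons.mp hl).1 x hx
    have ht : t.Pairwise (· ≤ ·) := (List.pairwise_cons.mp hl).2
    have h1 : pvRuns (some c) t = ((t.toFinset.erase c).card : Int) := ih ht c hct
    by_cases h : c = p
    · simp [pvRuns, h, h ▸ h1, Finset.erase_insert_eq_erase]
    · have hpc : p < c := lt_of_le_of_ne (hp c (by simp)) (fun e => h e.symm)
      have hpn : p ∉ insert c t.toFinset := by
        simp only [Finset.mem_insert, List.mem_toFinset]
        rintro (rfl | hm)
        · exact absurd rfl (ne_of_lt hpc)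
        · exact absurd (hct p hm) (not_le.mpr hpc)
      simp only [pvRuns, Option.some.injEq, h, if_false, h1, List.toFinset_cons,
        Finset.erase_eq_of_notMem hpn, pvCardInsert]
      push_cast
      ring

theorem pvRuns_sorted_none (l : List Char) (hl : l.Pairwise (· ≤ ·)) :
    pvRuns none l = (l.toFinset.card : Int) := by
  cases l with
  | nil => simp [pvRuns]
  | cons c t =>
    have hct : ∀ x ∈ t, c ≤ x := fun x hx => (List.pairwise_cons.mp hl).1 x hx
    have ht : t.Pairwise (· ≤ ·) := (List.pairwise_cons.mp hl).2
    have h1 : pvRuns (some c) t = ((t.toFinset.erase c).card : Int) :=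
      pvRuns_sorted_some t ht c hct
    simp only [pvRuns, reduceCtorEq, if_false, h1, List.toFinset_cons, pvCardInsert]
    push_cast
    ring

theorem pvOfList_length (l : List Char) :
    ((PySem.Set.ofList l).length : Int) = (l.toFinset.card : Int) := by
  have hnd : (PySem.Set.ofList l).Nodup := PySem.Set.nodup_ofList l
  have hm : (PySem.Set.ofList l).toFinset = l.toFinset := by
    ext x
    simp [List.mem_toFinset, PySem.Set.mem_ofList]
  rw [← List.toFinset_card_of_nodup hnd, hm]

-- ===== VERDICT (by name: the statement is the Claim_ definition above) =====
theorem maxDistinct_spec : Claim_equal_maxDistinct := by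
  intro s _
  unfold Spec_maxDistinct
  have hperm : (PySem.List.sorted s.toList (fun c => c) false).Perm s.toList :=
    PySem.List.sorted_perm _ _ _
  have hpw : (PySem.List.sorted s.toList (fun c => c) false).Pairwise (· ≤ ·) := by
    have := PySem.List.sorted_pairwise (xs := s.toList) (key := fun c => c)
    simpa using this
  have hfs : (PySem.List.sorted s.toList (fun c => c) false).toFinset = s.toList.toFinset := by
    ext x
    simp [List.mem_toFinset, hperm.mem_iff]
  rw [pvA_eq_ofList, pvOfList_length]
  rw [maxDistinct_alt, pvB_loop, pvRuns_sorted_none _ hpw, hfs]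
  ring
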